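-- pv_equiv track=rewrite | github.com/Guilty-C/AGENTIAD | dist/scripts/09_train_lora_sft_toy.py | _mask_labels_by_spans
-- ===== SOURCE A (Python) =====
-- from typing import Any, Dict, Iterable, List, Mapping, Optional, Sequence, Tuple
--
-- def _spans_intersect(a0: int, a1: int, b0: int, b1: int) -> bool:
--     return (a0 < b1) and (b0 < a1)
--
-- def _mask_labels_by_spans(
--     input_ids: List[int],
--     offsets: Sequence[Tuple[int, int]],
--     supervise_spans: Sequence[Tuple[int, int]],
--     ignore_id: int = -100,
-- ) -> List[int]:
--     labels = [ignore_id] * len(input_ids)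
--     for i, (s0, s1) in enumerate(offsets):
--         if s0 == 0 and s1 == 0:
--             continue
--         for (a0, a1) in supervise_spans:
--             if _spans_intersect(s0, s1, a0, a1):
--                 labels[i] = input_ids[i]
--                 break
--     return labels
-- ===== SOURCE B (Python) =====
-- from typing import List, Sequence, Tuple
--
-- def _bisect_left(a, x):
--     # stdlib bisect_left, hand-written (A imports no stdlib modules we could reuse)
--     lo, hi = 0, len(a)
--     while lo < hi:
--         mid = (lo + hi) // 2
--         if a[mid] < x:
--             lo = mid + 1
--         else:
--             hi = mid
--     return lo
--
-- def _mask_labels_by_spans(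
--     input_ids: List[int],
--     offsets: Sequence[Tuple[int, int]],
--     supervise_spans: Sequence[Tuple[int, int]],
--     ignore_id: int = -100,
-- ) -> List[int]:
--     # Sort spans by start; prefix maxima of ends let one binary search per offset
--     # decide "exists a span with a0 < s1 and a1 > s0".
--     sp = sorted(supervise_spans, key=lambda p: p[0])
--     starts = [p[0] for p in sp]
--     maxend = []
--     cur = None
--     for _, a1 in sp:
--         cur = a1 if cur is None else (a1 if a1 > cur else cur)
--         maxend.append(cur)
--     labels = []
--     for v, (s0, s1) in zip(input_ids, offsets):
--         if s0 == 0 and s1 == 0: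
--             labels.append(ignore_id)
--             continue
--         k = _bisect_left(starts, s1)
--         labels.append(v if k > 0 and maxend[k - 1] > s0 else ignore_id)
--     labels.extend([ignore_id] * (len(input_ids) - len(labels)))
--     return labels
-- ===== Notes on version B (the rewrite author's own statement) =====
-- stated objective: alternative
-- what changed: Instead of scanning every supervise span for each offset, B sorts the spans once by start, precomputes prefix maxima of span ends, and answers each offset's intersection query with one binary search.
import Mathlib
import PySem

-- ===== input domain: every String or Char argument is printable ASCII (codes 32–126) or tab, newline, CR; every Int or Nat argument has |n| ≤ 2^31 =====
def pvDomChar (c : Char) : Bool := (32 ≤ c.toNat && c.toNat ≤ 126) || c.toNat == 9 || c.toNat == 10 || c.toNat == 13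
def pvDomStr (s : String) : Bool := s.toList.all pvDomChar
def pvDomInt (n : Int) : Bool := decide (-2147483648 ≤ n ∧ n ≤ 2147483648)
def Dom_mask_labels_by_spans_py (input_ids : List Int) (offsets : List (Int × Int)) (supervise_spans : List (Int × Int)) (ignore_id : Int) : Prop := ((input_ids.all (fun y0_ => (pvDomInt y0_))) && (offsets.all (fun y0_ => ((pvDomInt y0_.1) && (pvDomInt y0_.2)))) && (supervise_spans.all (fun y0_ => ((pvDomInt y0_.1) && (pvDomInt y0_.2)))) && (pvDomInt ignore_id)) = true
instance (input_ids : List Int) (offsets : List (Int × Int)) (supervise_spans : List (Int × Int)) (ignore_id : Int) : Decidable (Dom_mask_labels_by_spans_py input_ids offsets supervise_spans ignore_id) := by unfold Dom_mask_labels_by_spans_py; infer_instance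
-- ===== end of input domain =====

-- B replaces A's per-token scan of all supervise_spans by sorting the spans once by
-- start with prefix maxima of their ends and answering each offset by one binary
-- search (objective: alternative algorithm; same return value).

-- ===== PORT A =====
def spans_intersect_py (a0 a1 b0 b1 : Int) : Bool := decide (a0 < b1) && decide (b0 < a1)

-- inner 'for (a0, a1) in supervise_spans: … break' loop
def maskA_inner (input_ids : List Int) (labels : List Int) (i : Nat) (s0 s1 : Int) : List (Int × Int) → List Int
  | [] => labels
  | (a0, a1) :: rest =>
    if spans_intersect_py s0 s1 a0 a1 then
      -- labels[i] = input_ids[i]; Pre_ excludes the IndexError (i ≥ len(input_ids)): none leaves labels unchanged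
      match PySem.List.pyGet? input_ids (i : Int) with
      | some v => labels.set i v
      | none => labels
    else maskA_inner input_ids labels i s0 s1 rest

-- outer 'for i, (s0, s1) in enumerate(offsets)' loop
def maskA_outer (input_ids : List Int) (spans : List (Int × Int)) (i : Nat) (labels : List Int) : List (Int × Int) → List Int
  | [] => labels
  | (s0, s1) :: rest =>
    maskA_outer input_ids spans (i + 1)
      (if s0 == 0 && s1 == 0 then labels else maskA_inner input_ids labels i s0 s1 spans) rest

def mask_labels_by_spans_py (input_ids : List Int) (offsets : List (Int × Int)) (supervise_spans : List (Int × Int)) (ignore_id : Int) : List Int :=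
  maskA_outer input_ids supervise_spans 0 (List.replicate input_ids.length ignore_id) offsets

-- ===== PORT B =====
-- prefix maxima of the span ends ('cur = a1 if cur is None else (a1 if a1 > cur else cur)')
def maskB_prefMax (cur : Option Int) : List (Int × Int) → List Int
  | [] => []
  | (_, a1) :: rest =>
    let c := match cur with | none => a1 | some c0 => if a1 > c0 then a1 else c0
    c :: maskB_prefMax (some c) rest

-- 'k = _bisect_left(starts, s1); v if k > 0 and maxend[k-1] > s0 else ignore_id'
-- (_bisect_left in Source B is the stdlib bisect_left loop; ported exactly as PySem.List.bisectLeft)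
def maskB_hit (starts maxend : List Int) (s0 s1 : Int) : Bool :=
  let k := PySem.List.bisectLeft starts s1
  decide (0 < k) && decide (s0 < maxend.getD (k - 1) 0)  -- k ≤ |starts| = |maxend|, so k-1 is in range when 0 < k

-- 'for v, (s0, s1) in zip(input_ids, offsets): labels.append(…)'
def maskB_zip (starts maxend : List Int) (ignore_id : Int) : List (Int × (Int × Int)) → List Int
  | [] => []
  | (v, (s0, s1)) :: rest =>
    (if s0 == 0 && s1 == 0 then ignore_id
     else if maskB_hit starts maxend s0 s1 then v else ignore_id) :: maskB_zip starts maxend ignore_id rest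

def mask_labels_by_spans_py_alt (input_ids : List Int) (offsets : List (Int × Int)) (supervise_spans : List (Int × Int)) (ignore_id : Int) : List Int :=
  let sp := PySem.List.sorted supervise_spans (fun p => p.1)
  let starts := sp.map (fun p => p.1)
  let maxend := maskB_prefMax none sp
  let zipped := input_ids.zip offsets
  maskB_zip starts maxend ignore_id zipped ++ List.replicate (input_ids.length - zipped.length) ignore_id

-- ===== PRECONDITION & SPEC =====
-- Pre_ excludes exactly the inputs where Python A raises IndexError: an offset at a position
-- past len(input_ids) that is nonzero and intersects some supervise span (labels[i] = input_ids[i] is out of range).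
def Pre_mask_labels_by_spans_py (input_ids : List Int) (offsets : List (Int × Int)) (supervise_spans : List (Int × Int)) (ignore_id : Int) : Prop :=
  ∀ p ∈ offsets.drop input_ids.length, p = ((0 : Int), (0 : Int)) ∨ ∀ q ∈ supervise_spans, ¬(p.1 < q.2 ∧ q.1 < p.2)
instance (input_ids : List Int) (offsets : List (Int × Int)) (supervise_spans : List (Int × Int)) (ignore_id : Int) : Decidable (Pre_mask_labels_by_spans_py input_ids offsets supervise_spans ignore_id) := by unfold Pre_mask_labels_by_spans_py; infer_instance

def pvWitness_mask_labels_by_spans_py : List Int × (List (Int × Int)) × (List (Int × Int)) × Int :=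
  ([5, 6], [(0, 1), (2, 3)], [(0, 2)], -100)

def Spec_mask_labels_by_spans_py (input_ids : List Int) (offsets : List (Int × Int)) (supervise_spans : List (Int × Int)) (ignore_id : Int) (out : List Int) : Prop := out = mask_labels_by_spans_py_alt input_ids offsets supervise_spans ignore_id
instance (input_ids : List Int) (offsets : List (Int × Int)) (supervise_spans : List (Int × Int)) (ignore_id : Int) (out : List Int) : Decidable (Spec_mask_labels_by_spans_py input_ids offsets supervise_spans ignore_id out) := by unfold Spec_mask_labels_by_spans_py; infer_instance

-- ===== CLAIM (what is proved, stated in full; the proofs are below) =====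
def Claim_equal_mask_labels_by_spans_py : Prop := ∀ (input_ids : List Int) (offsets : List (Int × Int)) (supervise_spans : List (Int × Int)) (ignore_id : Int), Dom_mask_labels_by_spans_py input_ids offsets supervise_spans ignore_id → Pre_mask_labels_by_spans_py input_ids offsets supervise_spans ignore_id → Spec_mask_labels_by_spans_py input_ids offsets supervise_spans ignore_id (mask_labels_by_spans_py input_ids offsets supervise_spans ignore_id)

-- ===== LEMMAS AND PROOFS =====

-- the Boolean "this offset gets its token id" condition, phrased on the raw span list
def hitBool (spans : List (Int × Int)) (s0 s1 : Int) : Bool :=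
  !(s0 == 0 && s1 == 0) && spans.any (fun q => decide (s0 < q.2) && decide (q.1 < s1))

theorem maskA_inner_eq (input_ids labels : List Int) (i : Nat) (s0 s1 : Int) (spans : List (Int × Int)) :
    maskA_inner input_ids labels i s0 s1 spans =
      if spans.any (fun q => decide (s0 < q.2) && decide (q.1 < s1)) then
        (match PySem.List.pyGet? input_ids (i : Int) with
         | some v => labels.set i v
         | none => labels)
      else labels := by
  induction spans with
  | nil => simp [maskA_inner]
  | cons q rest ih =>
    obtain ⟨a0, a1⟩ := q
    simp only [maskA_inner, List.any_cons, spans_intersect_py]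
    by_cases h : (decide (s0 < a1) && decide (a0 < s1)) = true
    · simp [h]
    · rw [ih]
      simp only [Bool.eq_false_iff.mpr h, Bool.false_or]
      rw [if_neg (by simp)]

theorem stepA (input_ids L : List Int) (hL : L.length = input_ids.length) (i j : Nat) (s0 s1 : Int) (spans : List (Int × Int)) :
    (if s0 == 0 && s1 == 0 then L else maskA_inner input_ids L i s0 s1 spans)[j]? =
      if decide (j = i) && hitBool spans s0 s1 then input_ids[j]? else L[j]? := by
  by_cases hz : (s0 == 0 && s1 == 0) = true
  · simp [hz, hitBool]
  · rw [if_neg hz, maskA_inner_eq]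
    by_cases ha : (spans.any (fun q => decide (s0 < q.2) && decide (q.1 < s1))) = true
    · rw [if_pos ha]
      have hh : hitBool spans s0 s1 = true := by
        simp [hitBool, ha, Bool.eq_false_iff.mpr hz]
      simp only [hh, Bool.and_true]
      by_cases hj : j = i
      · subst hj
        rw [PySem.List.pyGet?_natCast, if_pos (by simp)]
        by_cases hlt : j < input_ids.length
        · rw [List.getElem?_eq_getElem hlt]
          simp [List.getElem?_set, hL, hlt, List.getElem?_eq_getElem]
        · have hnone : input_ids[j]? = none := List.getElem?_eq_none (by omega)
          rw [hnone]
          simp [List.getElem?_eq_none (show L.length ≤ j by omega), hnone]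
      · simp only [decide_eq_true_eq, if_neg hj, PySem.List.pyGet?_natCast]
        cases hgi : input_ids[i]? with
        | none => rfl
        | some v => exact List.getElem?_set_ne (fun h => hj h.symm)
    · rw [if_neg ha]
      have hh : hitBool spans s0 s1 = false := by simp [hitBool, ha]
      simp [hh]

theorem maskA_outer_get? (input_ids : List Int) (spans : List (Int × Int)) :
    ∀ (offs : List (Int × Int)) (i : Nat) (labels : List Int), labels.length = input_ids.length →
    ∀ j : Nat,
      (maskA_outer input_ids spans i labels offs)[j]? =
        if decide (i ≤ j) && ((offs[j - i]?).any fun p => hitBool spans p.1 p.2) then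
          input_ids[j]?
        else labels[j]? := by
  intro offs
  induction offs with
  | nil => intro i L hL j; simp [maskA_outer]
  | cons p rest ih =>
    intro i L hL j
    obtain ⟨s0, s1⟩ := p
    simp only [maskA_outer]
    have hL1 : (if s0 == 0 && s1 == 0 then L else maskA_inner input_ids L i s0 s1 spans).length = input_ids.length := by
      split
      · exact hL
      · rw [maskA_inner_eq]
        split
        · cases hgi : PySem.List.pyGet? input_ids (i : Int) <;> simp [hL]
        · exact hL
    rw [ih (i + 1) _ hL1 j, stepA input_ids L hL i j s0 s1 spans]
    by_cases hij : i ≤ j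
    · by_cases hji : j = i
      · subst hji
        have h1 : ¬ (j + 1 ≤ j) := by omega
        simp [h1, Nat.sub_self]
      · have h1 : i + 1 ≤ j := by omega
        have h2 : j - i = (j - (i + 1)) + 1 := by omega
        simp only [h1, decide_true, hij, Bool.true_and, h2, List.getElem?_cons_succ,
          Bool.eq_false_iff.mpr (fun h => hji (of_decide_eq_true h)), Bool.false_and, if_false]
        rfl
    · have h1 : ¬ (i + 1 ≤ j) := by omega
      have h2 : decide (j = i) = false := by simp; omega
      simp [hij, h1, h2]

theorem maskB_prefMax_gt (s0 : Int) :
    ∀ (sp : List (Int × Int)) (cur : Option Int) (j : Nat), j < sp.length →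
      (s0 < (maskB_prefMax cur sp).getD j 0 ↔
        (∃ c, cur = some c ∧ s0 < c) ∨ ∃ q ∈ sp.take (j + 1), s0 < q.2) := by
  intro sp
  induction sp with
  | nil => intro cur j h; simp at h
  | cons p rest ih =>
    intro cur j h
    obtain ⟨a0, a1⟩ := p
    cases j with
    | zero =>
      simp only [maskB_prefMax, List.getD_cons_zero, List.take_succ_cons, List.take_zero]
      cases cur with
      | none => simp
      | some c0 =>
        by_cases hc : a1 > c0 <;> simp [hc] <;> omega
    | succ j =>
      have hj : j < rest.length := by simpa using h
      simp only [maskB_prefMax, List.getD_cons_succ]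
      rw [ih _ j hj]
      constructor
      · rintro (⟨c, hc, hs⟩ | ⟨q, hq, hs⟩)
        · cases cur with
          | none =>
            simp only [Option.some.injEq] at hc
            refine Or.inr ⟨(a0, a1), by simp, by subst hc; simpa using hs⟩
          | some c0 =>
            simp only [Option.some.injEq] at hc
            subst hc
            by_cases hgt : a1 > c0
            · exact Or.inr ⟨(a0, a1), by simp, by simpa [hgt] using hs⟩
            · exact Or.inl ⟨c0, rfl, by simpa [hgt] using hs⟩
        · exact Or.inr ⟨q, by simp [List.take_succ_cons]; exact Or.inr hq, hs⟩
      · rintro (⟨c, hc, hs⟩ | ⟨q, hq, hs⟩)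
        · refine Or.inl ⟨_, rfl, ?_⟩
          cases cur with
          | none => simp at hc
          | some c0 =>
            simp only [Option.some.injEq] at hc; subst hc
            by_cases hgt : a1 > c0 <;> simp [hgt] <;> omega
        · rw [List.take_succ_cons] at hq
          rcases List.mem_cons.mp hq with hq1 | hq2
          · subst hq1
            refine Or.inl ⟨_, rfl, ?_⟩
            simp only at hs
            cases cur with
            | none => simpa using hs
            | some c0 => by_cases hgt : a1 > c0 <;> simp [hgt] <;> omega
          · exact Or.inr ⟨q, hq2, hs⟩

theorem maskB_hit_iff (spans : List (Int × Int)) (s0 s1 : Int) :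
    maskB_hit ((PySem.List.sorted spans (fun p => p.1)).map (fun p => p.1))
        (maskB_prefMax none (PySem.List.sorted spans (fun p => p.1))) s0 s1 =
      spans.any (fun q => decide (s0 < q.2) && decide (q.1 < s1)) := by
  set sp := PySem.List.sorted spans (fun p => p.1) with hsp
  set starts := sp.map (fun p => p.1) with hst
  set k := PySem.List.bisectLeft starts s1 with hk
  have hpw : List.Pairwise (· ≤ ·) starts := PySem.List.sorted_map_key_pairwise spans (fun p => p.1)
  obtain ⟨hkle, hpre, hsuf⟩ := PySem.List.bisectLeft_spec starts s1 hpw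
  have hlen : starts.length = sp.length := by simp [hst]
  have hperm : sp.Perm spans := PySem.List.sorted_perm spans (fun p => p.1) false
  rw [Bool.eq_iff_iff]
  simp only [maskB_hit, Bool.and_eq_true, decide_eq_true_eq, List.any_eq_true, ← hk]
  constructor
  · rintro ⟨hk0, hgt⟩
    have hk1 : k - 1 < sp.length := by omega
    rw [maskB_prefMax_gt s0 sp none (k - 1) hk1] at hgt
    rcases hgt with ⟨c, hc, _⟩ | ⟨q, hq, hs⟩
    · exact absurd hc (by simp)
    · have hk1' : k - 1 + 1 = k := by omega
      rw [hk1'] at hq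
      rw [List.mem_take_iff_getElem] at hq
      obtain ⟨i, hi, hqe⟩ := hq
      have hilen : i < sp.length := by omega
      have hik : i < k := by omega
      have hstart : starts[i] < s1 := hpre i (by omega) hik
      have hq1 : q.1 < s1 := by
        have : starts[i] = sp[i].1 := by simp [hst]
        rw [this, hqe] at hstart; exact hstart
      exact ⟨q, hperm.mem_iff.mp (by rw [← hqe]; exact List.getElem_mem hilen), ⟨hs, hq1⟩⟩
  · rintro ⟨q, hq, hqc⟩
    obtain ⟨hs2, hs1⟩ := hqc
    have hqsp : q ∈ sp := hperm.mem_iff.mpr hq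
    obtain ⟨i, hilen, hqe⟩ := List.mem_iff_getElem.mp hqsp
    have hik : i < k := by
      by_contra hge
      have := hsuf i (by omega) (by omega)
      have hieq : starts[i] = sp[i].1 := by simp [hst]
      rw [hieq, hqe] at this
      omega
    have hk0 : 0 < k := by omega
    refine ⟨hk0, ?_⟩
    have hk1 : k - 1 < sp.length := by omega
    rw [maskB_prefMax_gt s0 sp none (k - 1) hk1]
    refine Or.inr ⟨q, ?_, hs2⟩
    rw [List.mem_take_iff_getElem]
    exact ⟨i, by omega, hqe⟩

theorem maskB_zip_length (starts maxend : List Int) (ignore_id : Int) :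
    ∀ (zs : List (Int × (Int × Int))), (maskB_zip starts maxend ignore_id zs).length = zs.length := by
  intro zs
  induction zs with
  | nil => rfl
  | cons z rest ih => obtain ⟨v, s0, s1⟩ := z; simp [maskB_zip, ih]

theorem maskB_zip_get? (starts maxend : List Int) (ignore_id : Int) :
    ∀ (zs : List (Int × (Int × Int))) (j : Nat),
      (maskB_zip starts maxend ignore_id zs)[j]? =
        (zs[j]?).map (fun z =>
          if z.2.1 == 0 && z.2.2 == 0 then ignore_id
          else if maskB_hit starts maxend z.2.1 z.2.2 then z.1 else ignore_id) := by
  intro zs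
  induction zs with
  | nil => intro j; simp [maskB_zip]
  | cons z rest ih =>
    intro j
    obtain ⟨v, s0, s1⟩ := z
    cases j with
    | zero => simp [maskB_zip]
    | succ j => simpa [maskB_zip] using ih j

-- ===== VERDICT (by name: the statement is the Claim_ definition above) =====
theorem mask_labels_by_spans_py_spec : Claim_equal_mask_labels_by_spans_py := by
  unfold Claim_equal_mask_labels_by_spans_py
  intro input_ids offsets spans ig _dom _pre
  unfold Spec_mask_labels_by_spans_py mask_labels_by_spans_py mask_labels_by_spans_py_alt
  apply List.ext_getElem?_iff.mpr
  intro j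
  rw [maskA_outer_get? input_ids spans offsets 0 _ (by simp) j]
  simp only [Nat.sub_zero, Nat.zero_le, decide_true, Bool.true_and]
  by_cases hz : j < (input_ids.zip offsets).length
  · have hjn : j < input_ids.length := by rw [List.length_zip] at hz; omega
    have hjm : j < offsets.length := by rw [List.length_zip] at hz; omega
    rw [List.getElem?_append_left (by rw [maskB_zip_length]; exact hz),
        maskB_zip_get?]
    rw [show (input_ids.zip offsets)[j]? = some (input_ids[j], offsets[j]) from by
      rw [List.getElem?_eq_getElem (by rw [List.length_zip]; omega)]
      simp [List.getElem_zip]]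
    simp only [Option.map_some, maskB_hit_iff]
    rw [List.getElem?_eq_getElem hjm]
    simp only [Option.any_some]
    by_cases h0 : (offsets[j].1 == 0 && offsets[j].2 == 0) = true
    · simp [hitBool, h0, List.getElem?_replicate, hjn]
    · by_cases ha : (spans.any fun q => decide (offsets[j].1 < q.2) && decide (q.1 < offsets[j].2)) = true
      · simp [hitBool, h0, ha, List.getElem?_eq_getElem hjn]
      · simp [hitBool, h0, ha, List.getElem?_replicate, hjn]
  · rw [List.getElem?_append_right (by rw [maskB_zip_length]; omega), maskB_zip_length]
    rw [List.length_zip] at hz ⊢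
    by_cases hjn : j < input_ids.length
    · have hm : offsets.length ≤ j := by omega
      rw [List.getElem?_eq_none hm]
      simp only [Option.any_none, Bool.false_eq_true, if_false]
      rw [List.getElem?_replicate, List.getElem?_replicate]
      have h1 : j < input_ids.length := hjn
      have h2 : j - min input_ids.length offsets.length < input_ids.length - min input_ids.length offsets.length := by omega
      simp [h1, h2]
    · have hrep1 : (List.replicate input_ids.length ig)[j]? = none := by
        rw [List.getElem?_replicate]; simp; omega
      have hin : input_ids[j]? = none := List.getElem?_eq_none (by omega)
      have hrep2 : (List.replicate (input_ids.length - min input_ids.length offsets.length) ig)[j - min input_ids.length offsets.length]? = none := by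
        rw [List.getElem?_replicate]; simp; omega
      rw [hrep2]
      split <;> simp [hrep1, hin]
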